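-- pv_equiv track=rewrite | github.com/TangXu-Group/Hyperspectral-Images-Classification | SpiralMamba/models/spiral_scan.py | get_hui_path_origin_path
-- ===== SOURCE A (Python) =====
-- def get_hui_path1(size): # (0, 0)出发
--     p = 0
--     q = size - 1
--     path1d = []
--     while p < q:
--         for i in range(p, q):
--             path1d.append(p * size + i)
--         for i in range(p, q):
--             path1d.append(i * size + q)
--         for i in range(q, p, -1):# 8,7,6,5,4,3,2,1
--             path1d.append(q * size + i)
--         for i in range(q, p, -1):
--             path1d.append(i * size + p)
--         p += 1
--         q -= 1
--     if q == p:
--         path1d.append(p * size + p)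
--     return path1d
--
-- def get_hui_path2(size): # (0, 8)出发
--     p = 0
--     q = size - 1
--     path1d = []
--     while p < q:
--         for i in range(p, q):
--             path1d.append(i * size + q)
--         for i in range(q, p, -1):# 8,7,6,5,4,3,2,1
--             path1d.append(q * size + i)
--         for i in range(q, p, -1):
--             path1d.append(i * size + p)
--         for i in range(p, q):
--             path1d.append(p * size + i)
--         p += 1
--         q -= 1
--     if q == p:
--         path1d.append(p * size + p)
--     return path1d
--
-- def get_hui_path3(size): # (8, 8)出发
--     p = 0
--     q = size - 1
--     path1d = []
--     while p < q:
--         for i in range(q, p, -1):# 8,7,6,5,4,3,2,1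
--             path1d.append(q * size + i)
--         for i in range(q, p, -1):
--             path1d.append(i * size + p)
--         for i in range(p, q):
--             path1d.append(p * size + i)
--         for i in range(p, q):
--             path1d.append(i * size + q)
--         p += 1
--         q -= 1
--     if q == p:
--         path1d.append(p * size + p)
--     return path1d
--
-- def get_hui_path4(size): # (8, 0)出发
--     p = 0
--     q = size - 1
--     path1d = []
--     while p < q:
--         for i in range(q, p, -1):
--             path1d.append(i * size + p)
--         for i in range(p, q):
--             path1d.append(p * size + i)
--         for i in range(p, q):
--             path1d.append(i * size + q)
--         for i in range(q, p, -1):# 8,7,6,5,4,3,2,1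
--             path1d.append(q * size + i)
--         p += 1
--         q -= 1
--     if q == p:
--         path1d.append(p * size + p)
--     return path1d
--
-- def get_hui_path_origin_path(spatial_size):
--     path1d1 = get_hui_path1(spatial_size)
--     path1d2 = get_hui_path2(spatial_size)
--     path1d3 = get_hui_path3(spatial_size)
--     path1d4 = get_hui_path4(spatial_size)
--     # hui路径1d
--     hui_path1ds = [path1d1, path1d2, path1d3, path1d4]
--     # 回溯路径
--     origin_path1ds = []
--     for hui_path1d in hui_path1ds:
--         # hui1d与原1d的映射关系
--         hui_map_origin = {}  # 矩阵直接展平后对应的一维数组的下标与回形遍历的一维数组下标之间的关系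
--         origin_path1d = []  # 矩阵直接展平后对应的一维数组的每个元素在回形遍历序列中的位置
--         for origin_id, hui_id in enumerate(hui_path1d):
--             hui_map_origin[hui_id] = origin_id
--         for id in range(spatial_size ** 2):
--             origin_path1d.append(hui_map_origin[id])
--         origin_path1ds.append(origin_path1d)
--     return hui_path1ds, origin_path1ds
-- ===== SOURCE B (Python) =====
-- def _ring_cell(n, p, q, t):
--     # perimeter parameterization of the ring with corners (p,p)..(q,q), clockwise from (p,p)
--     d = q - p
--     if t < d:
--         r, c = p, p + t
--     elif t < 2 * d:
--         r, c = p + (t - d), q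
--     elif t < 3 * d:
--         r, c = q, q - (t - 2 * d)
--     else:
--         r, c = q - (t - 3 * d), p
--     return r * n + c
--
-- def get_hui_path_origin_path(spatial_size):
--     n = spatial_size
--     p1, p2, p3, p4 = [], [], [], []
--     for r in range((n + 1) // 2):
--         p, q = r, n - 1 - r
--         d = q - p
--         if d == 0:
--             center = [p * n + p]
--             p1 += center; p2 += center; p3 += center; p4 += center
--         else:
--             cycle = [_ring_cell(n, p, q, t) for t in range(4 * d)]
--             p1 += cycle
--             p2 += cycle[d:] + cycle[:d]
--             p3 += cycle[2 * d:] + cycle[:2 * d]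
--             p4 += cycle[3 * d:] + cycle[:3 * d]
--     hui_path1ds = [p1, p2, p3, p4]
--     origin_path1ds = []
--     for path in hui_path1ds:
--         inv = [0] * (n * n)
--         for pos, cell in enumerate(path):
--             inv[cell] = pos
--         origin_path1ds.append(inv)
--     return hui_path1ds, origin_path1ds
-- ===== Notes on version B (the rewrite author's own statement) =====
-- stated objective: alternative
-- what changed: The four spiral paths are generated by one ring loop that builds a single perimeter-parameterized ring cycle and emits the four variants as rotations of it (instead of four separate while-loops with four append loops each), and each inverse permutation is built by scattering positions directly into a preallocated list instead of building a dict and then gathering over range(size**2).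
-- outside the precondition, e.g. on get_hui_path_origin_path(-1): A raises KeyError, B returns ([[], [], [], []], [[0], [0], [0], [0]])
import Mathlib
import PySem

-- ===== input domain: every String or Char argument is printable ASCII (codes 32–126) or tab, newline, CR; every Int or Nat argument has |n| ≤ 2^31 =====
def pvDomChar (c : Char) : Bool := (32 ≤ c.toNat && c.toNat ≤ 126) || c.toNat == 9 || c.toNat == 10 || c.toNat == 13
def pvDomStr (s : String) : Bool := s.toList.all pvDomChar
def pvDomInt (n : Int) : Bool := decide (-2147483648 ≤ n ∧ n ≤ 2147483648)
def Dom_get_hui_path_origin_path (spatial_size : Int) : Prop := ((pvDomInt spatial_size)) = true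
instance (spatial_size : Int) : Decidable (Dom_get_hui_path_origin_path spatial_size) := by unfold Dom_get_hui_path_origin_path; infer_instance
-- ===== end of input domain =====

-- B restructures A: the four per-ring segment loops become one perimeter-parameterized ring
-- cycle shared by all four paths as rotations, and each inverse is built by direct scatter
-- into a preallocated list instead of a dict plus a gather pass (objective: alternative).

-- ===== PORT A =====
-- while p < q: four append loops (top, right col, bottom reversed, left col reversed)
def huiWhile1 (size p q : Int) (acc : List Int) : Int × Int × List Int :=
  if _h : p < q then
    huiWhile1 size (p+1) (q-1) (acc
      ++ (PySem.List.pyRange p q 1).map (fun i => p * size + i)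
      ++ (PySem.List.pyRange p q 1).map (fun i => i * size + q)
      ++ (PySem.List.pyRange q p (-1)).map (fun i => q * size + i)
      ++ (PySem.List.pyRange q p (-1)).map (fun i => i * size + p))
  else (p, q, acc)
termination_by (q - p).toNat
decreasing_by omega

def get_hui_path1 (size : Int) : List Int :=
  let r := huiWhile1 size 0 (size - 1) []
  if r.2.1 = r.1 then r.2.2 ++ [r.1 * size + r.1] else r.2.2

def huiWhile2 (size p q : Int) (acc : List Int) : Int × Int × List Int :=
  if _h : p < q then
    huiWhile2 size (p+1) (q-1) (acc
      ++ (PySem.List.pyRange p q 1).map (fun i => i * size + q)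
      ++ (PySem.List.pyRange q p (-1)).map (fun i => q * size + i)
      ++ (PySem.List.pyRange q p (-1)).map (fun i => i * size + p)
      ++ (PySem.List.pyRange p q 1).map (fun i => p * size + i))
  else (p, q, acc)
termination_by (q - p).toNat
decreasing_by omega

def get_hui_path2 (size : Int) : List Int :=
  let r := huiWhile2 size 0 (size - 1) []
  if r.2.1 = r.1 then r.2.2 ++ [r.1 * size + r.1] else r.2.2

def huiWhile3 (size p q : Int) (acc : List Int) : Int × Int × List Int :=
  if _h : p < q then
    huiWhile3 size (p+1) (q-1) (acc
      ++ (PySem.List.pyRange q p (-1)).map (fun i => q * size + i)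
      ++ (PySem.List.pyRange q p (-1)).map (fun i => i * size + p)
      ++ (PySem.List.pyRange p q 1).map (fun i => p * size + i)
      ++ (PySem.List.pyRange p q 1).map (fun i => i * size + q))
  else (p, q, acc)
termination_by (q - p).toNat
decreasing_by omega

def get_hui_path3 (size : Int) : List Int :=
  let r := huiWhile3 size 0 (size - 1) []
  if r.2.1 = r.1 then r.2.2 ++ [r.1 * size + r.1] else r.2.2

def huiWhile4 (size p q : Int) (acc : List Int) : Int × Int × List Int :=
  if _h : p < q then
    huiWhile4 size (p+1) (q-1) (acc
      ++ (PySem.List.pyRange q p (-1)).map (fun i => i * size + p)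
      ++ (PySem.List.pyRange p q 1).map (fun i => p * size + i)
      ++ (PySem.List.pyRange p q 1).map (fun i => i * size + q)
      ++ (PySem.List.pyRange q p (-1)).map (fun i => q * size + i))
  else (p, q, acc)
termination_by (q - p).toNat
decreasing_by omega

def get_hui_path4 (size : Int) : List Int :=
  let r := huiWhile4 size 0 (size - 1) []
  if r.2.1 = r.1 then r.2.2 ++ [r.1 * size + r.1] else r.2.2

-- dict hui_id ↦ origin_id, then gather over range(size**2).
-- hui_map_origin[id] raises KeyError for a missing id; (get? …).getD 0 stands for that
-- lookup — Pre_ (0 ≤ spatial_size) keeps exactly the inputs where every key is present.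
def huiGather (spatial_size : Int) (hui_path1d : List Int) : List Int :=
  let hui_map_origin : PySem.Dict Int Int :=
    (PySem.List.enumerate hui_path1d 0).foldl
      (fun d oh => d.insert oh.2 oh.1) PySem.Dict.empty
  (PySem.List.pyRange 0 (spatial_size ^ 2) 1).map (fun id => (hui_map_origin.get? id).getD 0)

def get_hui_path_origin_path (spatial_size : Int) : List (List Int) × List (List Int) :=
  let path1d1 := get_hui_path1 spatial_size
  let path1d2 := get_hui_path2 spatial_size
  let path1d3 := get_hui_path3 spatial_size
  let path1d4 := get_hui_path4 spatial_size
  let hui_path1ds := [path1d1, path1d2, path1d3, path1d4]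
  (hui_path1ds, hui_path1ds.map (huiGather spatial_size))

-- ===== PORT B =====
-- perimeter parameterization of the ring with corners (p,p)..(q,q), clockwise from (p,p)
def ringCell (n p q t : Int) : Int :=
  let d := q - p
  if t < d then p * n + (p + t)
  else if t < 2 * d then (p + (t - d)) * n + q
  else if t < 3 * d then q * n + (q - (t - 2 * d))
  else (q - (t - 3 * d)) * n + p

-- for r in range((n+1)//2): extend the four paths with the ring cycle and its rotations
def altRings (n : Int) : List Int × List Int × List Int × List Int :=
  (PySem.List.pyRange 0 (PySem.Int.floordiv (n + 1) 2) 1).foldl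
    (fun st r =>
      let p := r
      let q := n - 1 - r
      let d := q - p
      if d = 0 then
        let center := [p * n + p]
        (st.1 ++ center, st.2.1 ++ center, st.2.2.1 ++ center, st.2.2.2 ++ center)
      else
        let cycle := (PySem.List.pyRange 0 (4 * d) 1).map (ringCell n p q)
        (st.1 ++ cycle,
         st.2.1 ++ (PySem.List.slice cycle (some d) none ++ PySem.List.slice cycle none (some d)),
         st.2.2.1 ++ (PySem.List.slice cycle (some (2*d)) none ++ PySem.List.slice cycle none (some (2*d))),
         st.2.2.2 ++ (PySem.List.slice cycle (some (3*d)) none ++ PySem.List.slice cycle none (some (3*d)))))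
    ([], [], [], [])

-- inv = [0] * (n*n); for pos, cell in enumerate(path): inv[cell] = pos
def scatterInv (n : Int) (path : List Int) : List Int :=
  (PySem.List.enumerate path 0).foldl
    (fun inv pc => PySem.List.pySetD inv pc.2 pc.1)
    (PySem.List.pyRepeat [0] (n * n))

def get_hui_path_origin_path_alt (spatial_size : Int) : List (List Int) × List (List Int) :=
  let st := altRings spatial_size
  let hui := [st.1, st.2.1, st.2.2.1, st.2.2.2]
  (hui, hui.map (scatterInv spatial_size))

-- ===== PRECONDITION & SPEC =====
-- Pre_ excludes negative sizes, on which A raises KeyError (empty paths, positive size**2).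
def Pre_get_hui_path_origin_path (spatial_size : Int) : Prop := 0 ≤ spatial_size
instance (spatial_size : Int) : Decidable (Pre_get_hui_path_origin_path spatial_size) := by
  unfold Pre_get_hui_path_origin_path; infer_instance

def pvWitness_get_hui_path_origin_path : Int := 3

def Spec_get_hui_path_origin_path (spatial_size : Int) (out : List (List Int) × List (List Int)) : Prop := out = get_hui_path_origin_path_alt spatial_size
instance (spatial_size : Int) (out : List (List Int) × List (List Int)) : Decidable (Spec_get_hui_path_origin_path spatial_size out) := by unfold Spec_get_hui_path_origin_path; infer_instance

-- ===== CLAIM (what is proved, stated in full; the proofs are below) =====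
def Claim_equal_get_hui_path_origin_path : Prop := ∀ (spatial_size : Int), Dom_get_hui_path_origin_path spatial_size → Pre_get_hui_path_origin_path spatial_size → Spec_get_hui_path_origin_path spatial_size (get_hui_path_origin_path spatial_size)

-- ===== LEMMAS AND PROOFS =====
-- the four straight segments of A's ring (top, right, bottom, left)
def segT (n p q : Int) : List Int := (PySem.List.pyRange p q 1).map (fun i => p * n + i)
def segR (n p q : Int) : List Int := (PySem.List.pyRange p q 1).map (fun i => i * n + q)
def segB (n p q : Int) : List Int := (PySem.List.pyRange q p (-1)).map (fun i => q * n + i)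
def segL (n p q : Int) : List Int := (PySem.List.pyRange q p (-1)).map (fun i => i * n + p)

-- B's ring cycle
def cyc (n p q : Int) : List Int := (PySem.List.pyRange 0 (4 * (q - p)) 1).map (ringCell n p q)

-- B's per-ring chunk for each of the four paths
def G1 (n r : Int) : List Int :=
  if (n - 1 - r) - r = 0 then [r * n + r] else cyc n r (n - 1 - r)
def G2 (n r : Int) : List Int :=
  if (n - 1 - r) - r = 0 then [r * n + r] else
    PySem.List.slice (cyc n r (n - 1 - r)) (some ((n - 1 - r) - r)) none
      ++ PySem.List.slice (cyc n r (n - 1 - r)) none (some ((n - 1 - r) - r))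
def G3 (n r : Int) : List Int :=
  if (n - 1 - r) - r = 0 then [r * n + r] else
    PySem.List.slice (cyc n r (n - 1 - r)) (some (2 * ((n - 1 - r) - r))) none
      ++ PySem.List.slice (cyc n r (n - 1 - r)) none (some (2 * ((n - 1 - r) - r)))
def G4 (n r : Int) : List Int :=
  if (n - 1 - r) - r = 0 then [r * n + r] else
    PySem.List.slice (cyc n r (n - 1 - r)) (some (3 * ((n - 1 - r) - r))) none
      ++ PySem.List.slice (cyc n r (n - 1 - r)) none (some (3 * ((n - 1 - r) - r)))

def post (n : Int) (t : Int × Int × List Int) : List Int :=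
  if t.2.1 = t.1 then t.2.2 ++ [t.1 * n + t.1] else t.2.2

lemma Rfact (n : Int) : 2 * PySem.Int.floordiv (n + 1) 2 ≤ n + 1 ∧ n ≤ 2 * PySem.Int.floordiv (n + 1) 2 := by
  have h1 := PySem.Int.floordiv_mul_add_mod (n + 1) 2
  have h2 := PySem.Int.mod_nonneg (n + 1) (by omega : (0:Int) < 2)
  have h3 := PySem.Int.mod_lt (n + 1) (by omega : (0:Int) < 2)
  omega

lemma lenT (n p q : Int) : (segT n p q).length = (q - p).toNat := by
  simp [segT, PySem.List.length_pyRange_one]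
lemma lenR (n p q : Int) : (segR n p q).length = (q - p).toNat := by
  simp [segR, PySem.List.length_pyRange_one]
lemma lenB (n p q : Int) : (segB n p q).length = (q - p).toNat := by
  simp [segB, PySem.List.length_pyRange_neg_one]

lemma pieceT (n p q : Int) (h : p < q) :
    (PySem.List.pyRange 0 (q - p) 1).map (ringCell n p q) = segT n p q := by
  rw [PySem.List.pyRange_one 0 (q - p), segT, PySem.List.pyRange_one p q]
  simp only [List.map_map]
  have he : (q - p - 0).toNat = (q - p).toNat := by omega
  rw [he]
  apply List.map_congr_left
  intro k hk
  simp only [List.mem_range] at hk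
  simp only [Function.comp]
  unfold ringCell
  rw [if_pos (by omega : (0 : Int) + (k : Int) < q - p)]
  ring

lemma pieceR (n p q : Int) (h : p < q) :
    (PySem.List.pyRange (q - p) (2 * (q - p)) 1).map (ringCell n p q) = segR n p q := by
  rw [PySem.List.pyRange_one (q - p) (2 * (q - p)), segR, PySem.List.pyRange_one p q]
  simp only [List.map_map]
  have he : (2 * (q - p) - (q - p)).toNat = (q - p).toNat := by omega
  rw [he]
  apply List.map_congr_left
  intro k hk
  simp only [List.mem_range] at hk
  simp only [Function.comp]
  unfold ringCell
  rw [if_neg (by omega), if_pos (by omega : q - p + (k : Int) < 2 * (q - p))]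
  ring

lemma pieceB (n p q : Int) (h : p < q) :
    (PySem.List.pyRange (2 * (q - p)) (3 * (q - p)) 1).map (ringCell n p q) = segB n p q := by
  rw [PySem.List.pyRange_one (2 * (q - p)) (3 * (q - p)), segB, PySem.List.pyRange_neg_one q p]
  simp only [List.map_map]
  have he : (3 * (q - p) - 2 * (q - p)).toNat = (q - p).toNat := by omega
  rw [he]
  apply List.map_congr_left
  intro k hk
  simp only [List.mem_range] at hk
  simp only [Function.comp]
  unfold ringCell
  rw [if_neg (by omega), if_neg (by omega), if_pos (by omega : 2 * (q - p) + (k : Int) < 3 * (q - p))]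
  ring

lemma pieceL (n p q : Int) (h : p < q) :
    (PySem.List.pyRange (3 * (q - p)) (4 * (q - p)) 1).map (ringCell n p q) = segL n p q := by
  rw [PySem.List.pyRange_one (3 * (q - p)) (4 * (q - p)), segL, PySem.List.pyRange_neg_one q p]
  simp only [List.map_map]
  have he : (4 * (q - p) - 3 * (q - p)).toNat = (q - p).toNat := by omega
  rw [he]
  apply List.map_congr_left
  intro k hk
  simp only [List.mem_range] at hk
  simp only [Function.comp]
  unfold ringCell
  rw [if_neg (by omega), if_neg (by omega), if_neg (by omega)]
  ring

lemma cycSplit (n p q : Int) (h : p < q) :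
    cyc n p q = segT n p q ++ segR n p q ++ segB n p q ++ segL n p q := by
  unfold cyc
  rw [PySem.List.pyRange_one_append 0 (q - p) (4 * (q - p)) (by omega) (by omega),
      PySem.List.pyRange_one_append (q - p) (2 * (q - p)) (4 * (q - p)) (by omega) (by omega),
      PySem.List.pyRange_one_append (2 * (q - p)) (3 * (q - p)) (4 * (q - p)) (by omega) (by omega)]
  simp only [List.map_append]
  rw [pieceT n p q h, pieceR n p q h, pieceB n p q h, pieceL n p q h]
  simp [List.append_assoc]

lemma rot1 (n p q : Int) (h : p < q) :
    PySem.List.slice (cyc n p q) (some (q - p)) none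
      ++ PySem.List.slice (cyc n p q) none (some (q - p))
    = segR n p q ++ segB n p q ++ segL n p q ++ segT n p q := by
  rw [PySem.List.slice_from _ (by omega : (0:Int) ≤ q - p),
      PySem.List.slice_to _ (by omega : (0:Int) ≤ q - p), cycSplit n p q h]
  have hl : (segT n p q).length = (q - p).toNat := lenT n p q
  rw [show segT n p q ++ segR n p q ++ segB n p q ++ segL n p q
        = segT n p q ++ (segR n p q ++ segB n p q ++ segL n p q) by simp [List.append_assoc]]
  rw [List.drop_left' hl, List.take_left' hl]

lemma rot2 (n p q : Int) (h : p < q) :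
    PySem.List.slice (cyc n p q) (some (2 * (q - p))) none
      ++ PySem.List.slice (cyc n p q) none (some (2 * (q - p)))
    = segB n p q ++ segL n p q ++ segT n p q ++ segR n p q := by
  rw [PySem.List.slice_from _ (by omega : (0:Int) ≤ 2 * (q - p)),
      PySem.List.slice_to _ (by omega : (0:Int) ≤ 2 * (q - p)), cycSplit n p q h]
  have hl : (segT n p q ++ segR n p q).length = (2 * (q - p)).toNat := by
    simp [lenT, lenR]; omega
  rw [show segT n p q ++ segR n p q ++ segB n p q ++ segL n p q
        = (segT n p q ++ segR n p q) ++ (segB n p q ++ segL n p q) by simp [List.append_assoc]]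
  rw [List.drop_left' hl, List.take_left' hl]
  simp [List.append_assoc]

lemma rot3 (n p q : Int) (h : p < q) :
    PySem.List.slice (cyc n p q) (some (3 * (q - p))) none
      ++ PySem.List.slice (cyc n p q) none (some (3 * (q - p)))
    = segL n p q ++ segT n p q ++ segR n p q ++ segB n p q := by
  rw [PySem.List.slice_from _ (by omega : (0:Int) ≤ 3 * (q - p)),
      PySem.List.slice_to _ (by omega : (0:Int) ≤ 3 * (q - p)), cycSplit n p q h]
  have hl : (segT n p q ++ segR n p q ++ segB n p q).length = (3 * (q - p)).toNat := by
    simp [lenT, lenR, lenB]; omega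
  rw [show segT n p q ++ segR n p q ++ segB n p q ++ segL n p q
        = (segT n p q ++ segR n p q ++ segB n p q) ++ segL n p q by simp [List.append_assoc]]
  rw [List.drop_left' hl, List.take_left' hl]
  simp [List.append_assoc]

lemma whileGen (n : Int) (W : Int → Int → List Int → Int × Int × List Int)
    (chunk : Int → Int → List Int) (G : Int → List Int)
    (hW : ∀ p q acc, W p q acc = if p < q then W (p+1) (q-1) (acc ++ chunk p q) else (p, q, acc))
    (hG : ∀ r, 0 ≤ r → 2*r < n - 1 → G r = chunk r (n - 1 - r))
    (hGc : ∀ r, 0 ≤ r → n - 1 = 2*r → G r = [r * n + r]) :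
    ∀ (fuel : Nat) (r : Int) (acc : List Int), 0 ≤ r →
      (fuel : Int) = PySem.Int.floordiv (n + 1) 2 - r →
      post n (W r (n - 1 - r) acc)
        = acc ++ ((List.range fuel).map (fun (j : Nat) => G (r + (j : Int)))).flatten := by
  have hR := Rfact n
  intro fuel
  induction fuel with
  | zero =>
    intro r acc hr hf
    simp only [Nat.cast_zero] at hf
    rw [hW]
    rw [if_neg (by omega : ¬ r < n - 1 - r)]
    unfold post
    simp only
    rw [if_neg (by omega : ¬ n - 1 - r = r)]
    simp
  | succ m IH =>
    intro r acc hr hf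
    push_cast at hf
    by_cases hlt : 2 * r < n - 1
    · rw [hW]
      rw [if_pos (by omega : r < n - 1 - r)]
      rw [show n - 1 - r - 1 = n - 1 - (r + 1) by ring]
      rw [IH (r + 1) (acc ++ chunk r (n - 1 - r)) (by omega) (by omega)]
      rw [List.range_succ_eq_map]
      simp only [List.map_cons, List.map_map, List.flatten_cons, Nat.cast_zero, add_zero]
      rw [← hG r hr hlt]
      rw [List.append_assoc]
      congr 2
      refine congrArg List.flatten ?_
      apply List.map_congr_left
      intro j _
      simp only [Function.comp]
      congr 1
      push_cast
      ring
    · have heq : n - 1 = 2 * r := by omega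
      have hm : m = 0 := by omega
      subst hm
      rw [hW]
      rw [if_neg (by omega : ¬ r < n - 1 - r)]
      unfold post
      simp only
      rw [if_pos (by omega : n - 1 - r = r)]
      simp [hGc r hr heq]

lemma foldl4 (g1 g2 g3 g4 : Int → List Int) :
    ∀ (L : List Int) (a b c d : List Int),
      L.foldl (fun st r => (st.1 ++ g1 r, st.2.1 ++ g2 r, st.2.2.1 ++ g3 r, st.2.2.2 ++ g4 r)) (a, b, c, d)
        = (a ++ L.flatMap g1, b ++ L.flatMap g2, c ++ L.flatMap g3, d ++ L.flatMap g4) := by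
  intro L
  induction L with
  | nil => intro a b c d; simp
  | cons x xs IH =>
    intro a b c d
    simp only [List.foldl_cons, IH, List.flatMap_cons, List.append_assoc]

lemma altRings_eq (n : Int) :
    altRings n = (((PySem.List.pyRange 0 (PySem.Int.floordiv (n + 1) 2) 1).flatMap (G1 n)),
                  ((PySem.List.pyRange 0 (PySem.Int.floordiv (n + 1) 2) 1).flatMap (G2 n)),
                  ((PySem.List.pyRange 0 (PySem.Int.floordiv (n + 1) 2) 1).flatMap (G3 n)),
                  ((PySem.List.pyRange 0 (PySem.Int.floordiv (n + 1) 2) 1).flatMap (G4 n))) := by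
  unfold altRings
  have hb : (fun (st : List Int × List Int × List Int × List Int) (r : Int) =>
      let p := r
      let q := n - 1 - r
      let d := q - p
      if d = 0 then
        let center := [p * n + p]
        (st.1 ++ center, st.2.1 ++ center, st.2.2.1 ++ center, st.2.2.2 ++ center)
      else
        let cycle := (PySem.List.pyRange 0 (4 * d) 1).map (ringCell n p q)
        (st.1 ++ cycle,
         st.2.1 ++ (PySem.List.slice cycle (some d) none ++ PySem.List.slice cycle none (some d)),
         st.2.2.1 ++ (PySem.List.slice cycle (some (2*d)) none ++ PySem.List.slice cycle none (some (2*d))),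
         st.2.2.2 ++ (PySem.List.slice cycle (some (3*d)) none ++ PySem.List.slice cycle none (some (3*d)))))
    = (fun st r => (st.1 ++ G1 n r, st.2.1 ++ G2 n r, st.2.2.1 ++ G3 n r, st.2.2.2 ++ G4 n r)) := by
    funext st r
    simp only [G1, G2, G3, G4, cyc]
    split <;> rfl
  rw [hb, foldl4 (G1 n) (G2 n) (G3 n) (G4 n) _ [] [] [] []]
  simp

lemma path_eq1 (n : Int) (hn : 0 ≤ n) :
    get_hui_path1 n = (PySem.List.pyRange 0 (PySem.Int.floordiv (n + 1) 2) 1).flatMap (G1 n) := by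
  have hR := Rfact n
  have h0 : (0:Int) ≤ PySem.Int.floordiv (n + 1) 2 := by omega
  have hW : ∀ p q acc, huiWhile1 n p q acc
      = if p < q then huiWhile1 n (p+1) (q-1) (acc ++ (segT n p q ++ segR n p q ++ segB n p q ++ segL n p q)) else (p, q, acc) := by
    intro p q acc
    rw [huiWhile1]
    split
    · exact congrArg (huiWhile1 n (p+1) (q-1))
        (by simp [segT, segR, segB, segL, List.append_assoc])
    · rfl
  have hG : ∀ r, 0 ≤ r → 2*r < n - 1 → G1 n r = segT n r (n-1-r) ++ segR n r (n-1-r) ++ segB n r (n-1-r) ++ segL n r (n-1-r) := by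
    intro r h0r hlt
    rw [G1, if_neg (by omega)]
    exact cycSplit n r (n-1-r) (by omega)
  have hGc : ∀ r, 0 ≤ r → n - 1 = 2*r → G1 n r = [r * n + r] := by
    intro r h0r heq
    rw [G1, if_pos (by omega)]
  have key := whileGen n (huiWhile1 n) (fun p q => segT n p q ++ segR n p q ++ segB n p q ++ segL n p q) (G1 n) hW hG hGc
    ((PySem.Int.floordiv (n + 1) 2).toNat) 0 [] le_rfl (by omega)
  rw [show n - 1 - (0:Int) = n - 1 by ring] at key
  have hgp : get_hui_path1 n = post n (huiWhile1 n 0 (n - 1) []) := rfl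
  rw [hgp, key]
  rw [PySem.List.pyRange_one]
  rw [show ((PySem.Int.floordiv (n + 1) 2) - 0).toNat = (PySem.Int.floordiv (n + 1) 2).toNat by omega]
  simp only [List.nil_append]
  simp [List.flatMap_def, List.map_map, Function.comp_def]

lemma path_eq2 (n : Int) (hn : 0 ≤ n) :
    get_hui_path2 n = (PySem.List.pyRange 0 (PySem.Int.floordiv (n + 1) 2) 1).flatMap (G2 n) := by
  have hR := Rfact n
  have h0 : (0:Int) ≤ PySem.Int.floordiv (n + 1) 2 := by omega
  have hW : ∀ p q acc, huiWhile2 n p q acc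
      = if p < q then huiWhile2 n (p+1) (q-1) (acc ++ (segR n p q ++ segB n p q ++ segL n p q ++ segT n p q)) else (p, q, acc) := by
    intro p q acc
    rw [huiWhile2]
    split
    · exact congrArg (huiWhile2 n (p+1) (q-1))
        (by simp [segT, segR, segB, segL, List.append_assoc])
    · rfl
  have hG : ∀ r, 0 ≤ r → 2*r < n - 1 → G2 n r = segR n r (n-1-r) ++ segB n r (n-1-r) ++ segL n r (n-1-r) ++ segT n r (n-1-r) := by
    intro r h0r hlt
    rw [G2, if_neg (by omega)]
    exact rot1 n r (n-1-r) (by omega)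
  have hGc : ∀ r, 0 ≤ r → n - 1 = 2*r → G2 n r = [r * n + r] := by
    intro r h0r heq
    rw [G2, if_pos (by omega)]
  have key := whileGen n (huiWhile2 n) (fun p q => segR n p q ++ segB n p q ++ segL n p q ++ segT n p q) (G2 n) hW hG hGc
    ((PySem.Int.floordiv (n + 1) 2).toNat) 0 [] le_rfl (by omega)
  rw [show n - 1 - (0:Int) = n - 1 by ring] at key
  have hgp : get_hui_path2 n = post n (huiWhile2 n 0 (n - 1) []) := rfl
  rw [hgp, key]
  rw [PySem.List.pyRange_one]
  rw [show ((PySem.Int.floordiv (n + 1) 2) - 0).toNat = (PySem.Int.floordiv (n + 1) 2).toNat by omega]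
  simp only [List.nil_append]
  simp [List.flatMap_def, List.map_map, Function.comp_def]

lemma path_eq3 (n : Int) (hn : 0 ≤ n) :
    get_hui_path3 n = (PySem.List.pyRange 0 (PySem.Int.floordiv (n + 1) 2) 1).flatMap (G3 n) := by
  have hR := Rfact n
  have h0 : (0:Int) ≤ PySem.Int.floordiv (n + 1) 2 := by omega
  have hW : ∀ p q acc, huiWhile3 n p q acc
      = if p < q then huiWhile3 n (p+1) (q-1) (acc ++ (segB n p q ++ segL n p q ++ segT n p q ++ segR n p q)) else (p, q, acc) := by
    intro p q acc
    rw [huiWhile3]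
    split
    · exact congrArg (huiWhile3 n (p+1) (q-1))
        (by simp [segT, segR, segB, segL, List.append_assoc])
    · rfl
  have hG : ∀ r, 0 ≤ r → 2*r < n - 1 → G3 n r = segB n r (n-1-r) ++ segL n r (n-1-r) ++ segT n r (n-1-r) ++ segR n r (n-1-r) := by
    intro r h0r hlt
    rw [G3, if_neg (by omega)]
    exact rot2 n r (n-1-r) (by omega)
  have hGc : ∀ r, 0 ≤ r → n - 1 = 2*r → G3 n r = [r * n + r] := by
    intro r h0r heq
    rw [G3, if_pos (by omega)]
  have key := whileGen n (huiWhile3 n) (fun p q => segB n p q ++ segL n p q ++ segT n p q ++ segR n p q) (G3 n) hW hG hGc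
    ((PySem.Int.floordiv (n + 1) 2).toNat) 0 [] le_rfl (by omega)
  rw [show n - 1 - (0:Int) = n - 1 by ring] at key
  have hgp : get_hui_path3 n = post n (huiWhile3 n 0 (n - 1) []) := rfl
  rw [hgp, key]
  rw [PySem.List.pyRange_one]
  rw [show ((PySem.Int.floordiv (n + 1) 2) - 0).toNat = (PySem.Int.floordiv (n + 1) 2).toNat by omega]
  simp only [List.nil_append]
  simp [List.flatMap_def, List.map_map, Function.comp_def]

lemma path_eq4 (n : Int) (hn : 0 ≤ n) :
    get_hui_path4 n = (PySem.List.pyRange 0 (PySem.Int.floordiv (n + 1) 2) 1).flatMap (G4 n) := by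
  have hR := Rfact n
  have h0 : (0:Int) ≤ PySem.Int.floordiv (n + 1) 2 := by omega
  have hW : ∀ p q acc, huiWhile4 n p q acc
      = if p < q then huiWhile4 n (p+1) (q-1) (acc ++ (segL n p q ++ segT n p q ++ segR n p q ++ segB n p q)) else (p, q, acc) := by
    intro p q acc
    rw [huiWhile4]
    split
    · exact congrArg (huiWhile4 n (p+1) (q-1))
        (by simp [segT, segR, segB, segL, List.append_assoc])
    · rfl
  have hG : ∀ r, 0 ≤ r → 2*r < n - 1 → G4 n r = segL n r (n-1-r) ++ segT n r (n-1-r) ++ segR n r (n-1-r) ++ segB n r (n-1-r) := by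
    intro r h0r hlt
    rw [G4, if_neg (by omega)]
    exact rot3 n r (n-1-r) (by omega)
  have hGc : ∀ r, 0 ≤ r → n - 1 = 2*r → G4 n r = [r * n + r] := by
    intro r h0r heq
    rw [G4, if_pos (by omega)]
  have key := whileGen n (huiWhile4 n) (fun p q => segL n p q ++ segT n p q ++ segR n p q ++ segB n p q) (G4 n) hW hG hGc
    ((PySem.Int.floordiv (n + 1) 2).toNat) 0 [] le_rfl (by omega)
  rw [show n - 1 - (0:Int) = n - 1 by ring] at key
  have hgp : get_hui_path4 n = post n (huiWhile4 n 0 (n - 1) []) := rfl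
  rw [hgp, key]
  rw [PySem.List.pyRange_one]
  rw [show ((PySem.Int.floordiv (n + 1) 2) - 0).toNat = (PySem.Int.floordiv (n + 1) 2).toNat by omega]
  simp only [List.nil_append]
  simp [List.flatMap_def, List.map_map, Function.comp_def]

lemma cellBound (n row col : Int) (h1 : 0 ≤ row) (h2 : row < n) (h3 : 0 ≤ col) (h4 : col < n) :
    0 ≤ row * n + col ∧ row * n + col < n * n := by
  constructor
  · have : 0 ≤ row * n := mul_nonneg h1 (by omega)
    omega
  · nlinarith

lemma cycBound (n r x : Int) (hr : 0 ≤ r) (hd : 2 * r ≤ n - 1) (hx : x ∈ cyc n r (n - 1 - r)) :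
    0 ≤ x ∧ x < n * n := by
  unfold cyc at hx
  simp only [List.mem_map] at hx
  obtain ⟨t, ht, rfl⟩ := hx
  rw [PySem.List.mem_pyRange_one] at ht
  unfold ringCell
  dsimp only
  split_ifs with hA hB hC
  · exact cellBound n _ _ (by omega) (by omega) (by omega) (by omega)
  · exact cellBound n _ _ (by omega) (by omega) (by omega) (by omega)
  · exact cellBound n _ _ (by omega) (by omega) (by omega) (by omega)
  · exact cellBound n _ _ (by omega) (by omega) (by omega) (by omega)

lemma sliceMem (L : List Int) (a : Int) (x : Int)
    (h : x ∈ PySem.List.slice L (some a) none ++ PySem.List.slice L none (some a)) : x ∈ L := by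
  rcases List.mem_append.1 h with h' | h' <;> exact PySem.List.mem_of_mem_slice _ _ _ h'

lemma boundG1 (n : Int) (hn : 0 ≤ n) (x : Int)
    (hx : x ∈ (PySem.List.pyRange 0 (PySem.Int.floordiv (n + 1) 2) 1).flatMap (G1 n)) :
    0 ≤ x ∧ x < n * n := by
  have hR := Rfact n
  simp only [List.mem_flatMap] at hx
  obtain ⟨r, hr, hxr⟩ := hx
  rw [PySem.List.mem_pyRange_one] at hr
  have h2 : 2 * r ≤ n - 1 := by omega
  rw [G1] at hxr
  split_ifs at hxr with hd
  · simp only [List.mem_singleton] at hxr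
    subst hxr
    exact cellBound n r r (by omega) (by omega) (by omega) (by omega)
  · exact cycBound n r x hr.1 h2 hxr

lemma boundG2 (n : Int) (hn : 0 ≤ n) (x : Int)
    (hx : x ∈ (PySem.List.pyRange 0 (PySem.Int.floordiv (n + 1) 2) 1).flatMap (G2 n)) :
    0 ≤ x ∧ x < n * n := by
  have hR := Rfact n
  simp only [List.mem_flatMap] at hx
  obtain ⟨r, hr, hxr⟩ := hx
  rw [PySem.List.mem_pyRange_one] at hr
  have h2 : 2 * r ≤ n - 1 := by omega
  rw [G2] at hxr
  split_ifs at hxr with hd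
  · simp only [List.mem_singleton] at hxr
    subst hxr
    exact cellBound n r r (by omega) (by omega) (by omega) (by omega)
  · exact cycBound n r x hr.1 h2 (sliceMem _ _ _ hxr)

lemma boundG3 (n : Int) (hn : 0 ≤ n) (x : Int)
    (hx : x ∈ (PySem.List.pyRange 0 (PySem.Int.floordiv (n + 1) 2) 1).flatMap (G3 n)) :
    0 ≤ x ∧ x < n * n := by
  have hR := Rfact n
  simp only [List.mem_flatMap] at hx
  obtain ⟨r, hr, hxr⟩ := hx
  rw [PySem.List.mem_pyRange_one] at hr
  have h2 : 2 * r ≤ n - 1 := by omega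
  rw [G3] at hxr
  split_ifs at hxr with hd
  · simp only [List.mem_singleton] at hxr
    subst hxr
    exact cellBound n r r (by omega) (by omega) (by omega) (by omega)
  · exact cycBound n r x hr.1 h2 (sliceMem _ _ _ hxr)

lemma boundG4 (n : Int) (hn : 0 ≤ n) (x : Int)
    (hx : x ∈ (PySem.List.pyRange 0 (PySem.Int.floordiv (n + 1) 2) 1).flatMap (G4 n)) :
    0 ≤ x ∧ x < n * n := by
  have hR := Rfact n
  simp only [List.mem_flatMap] at hx
  obtain ⟨r, hr, hxr⟩ := hx
  rw [PySem.List.mem_pyRange_one] at hr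
  have h2 : 2 * r ≤ n - 1 := by omega
  rw [G4] at hxr
  split_ifs at hxr with hd
  · simp only [List.mem_singleton] at hxr
    subst hxr
    exact cellBound n r r (by omega) (by omega) (by omega) (by omega)
  · exact cycBound n r x hr.1 h2 (sliceMem _ _ _ hxr)

lemma setMapRange (m c v : Int) (f : Int → Int) (h0 : 0 ≤ c) (_hc : c < m) :
    ((PySem.List.pyRange 0 m 1).map f).set c.toNat v
      = (PySem.List.pyRange 0 m 1).map (fun id => if id = c then v else f id) := by
  apply List.ext_getElem
  · simp
  · intro k h1 h2
    simp only [List.getElem_set, List.getElem_map, PySem.List.getElem_pyRange_one]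
    split_ifs <;> first | rfl | omega

lemma invEq (n : Int) (_hn : 0 ≤ n) (path : List Int) :
    (∀ c ∈ path, 0 ≤ c ∧ c < n * n) → huiGather n path = scatterInv n path := by
  induction path using List.reverseRecOn with
  | nil =>
    intro _
    unfold huiGather scatterInv
    simp only [PySem.List.enumerate_nil, List.foldl_nil]
    rw [PySem.List.pyRepeat_singleton]
    refine List.eq_replicate_iff.2 ⟨?_, ?_⟩
    · simp only [List.length_map, PySem.List.length_pyRange_one]
      have : n ^ 2 = n * n := pow_two n
      omega
    · intro b hb
      simp only [List.mem_map] at hb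
      obtain ⟨id, _, rfl⟩ := hb
      simp [PySem.Dict.get?_empty]
  | append_singleton L c IH =>
    intro hb
    have hbL : ∀ x ∈ L, 0 ≤ x ∧ x < n * n := fun x hx => hb x (by simp [hx])
    have hc := hb c (by simp)
    unfold huiGather scatterInv
    rw [PySem.List.enumerate_append]
    simp only [PySem.List.enumerate_cons, PySem.List.enumerate_nil, List.foldl_append,
      List.foldl_cons, List.foldl_nil]
    rw [PySem.List.pySetD_of_nonneg _ _ hc.1]
    have IH' := IH hbL
    unfold huiGather scatterInv at IH'
    rw [← IH']
    rw [setMapRange (n ^ 2) c _ _ hc.1 (by have : n ^ 2 = n * n := pow_two n; omega)]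
    apply List.map_congr_left
    intro id _
    rw [PySem.Dict.get?_insert]
    split_ifs <;> simp

-- ===== VERDICT (by name: the statement is the Claim_ definition above) =====
theorem get_hui_path_origin_path_spec : Claim_equal_get_hui_path_origin_path := by
  intro n _hdom hpre
  have hn : (0:Int) ≤ n := hpre
  unfold Spec_get_hui_path_origin_path
  unfold get_hui_path_origin_path get_hui_path_origin_path_alt
  rw [altRings_eq n]
  simp only [List.map_cons, List.map_nil]
  rw [path_eq1 n hn, path_eq2 n hn, path_eq3 n hn, path_eq4 n hn]
  rw [invEq n hn _ (fun c hc => boundG1 n hn c hc),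
      invEq n hn _ (fun c hc => boundG2 n hn c hc),
      invEq n hn _ (fun c hc => boundG3 n hn c hc),
      invEq n hn _ (fun c hc => boundG4 n hn c hc)]
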